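-- pv_equiv track=rewrite | github.com/bepnye/evidence_extraction | scripts/coref_scores.py | links_from_clusters
-- ===== SOURCE A (Python) =====
-- import itertools as it
-- import typing as ty
--
-- def links_from_clusters(
--     clusters: ty.Iterable[ty.Set],
-- ) -> ty.Tuple[
--     ty.Sequence[ty.Tuple[ty.Hashable, ty.Hashable]],
--     ty.Sequence[ty.Tuple[ty.Hashable, ty.Hashable]],
-- ]:
--     r'''
--     Return a `(coreference_links, non-coreference_links)` tuple corresponding to a clustering.
--     '''
--     clusters_lst = list(clusters)
--     elements = sorted(set.union(*clusters_lst))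
--     C = []
--     N = []
--     for i, j in it.combinations(elements, 2):
--         if i == j:
--             continue
--         elif any(c for c in clusters_lst if i in c and j in c):
--             C.append((i, j))
--         else:
--             N.append((i, j))
--     return C, N
-- ===== SOURCE B (Python) =====
-- def links_from_clusters(clusters):
--     r'''
--     Return a `(coreference_links, non-coreference_links)` tuple corresponding to a clustering.
--     Faster: one pass builds an element -> set-of-cluster-ids index, so each pair is
--     classified by a set intersection instead of a scan over all clusters.
--     '''
--     clusters_lst = list(clusters)
--     member_ids = {}
--     for k, c in enumerate(clusters_lst):
--         for x in c:
--             member_ids.setdefault(x, set()).add(k)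
--     C = []
--     N = []
--     rest = sorted(member_ids)
--     while rest:
--         i, rest = rest[0], rest[1:]
--         ids_i = member_ids[i]
--         for j in rest:
--             if ids_i & member_ids[j]:
--                 C.append((i, j))
--             else:
--                 N.append((i, j))
--     return C, N
-- ===== Notes on version B (the rewrite author's own statement) =====
-- stated objective: faster
-- what changed: B builds an element-to-cluster-id-set index in one pass and classifies each pair by a set intersection, instead of A's scan over all clusters for every pair.
-- outside the precondition, e.g. on links_from_clusters([]): A raises TypeError, B returns ([], [])
import Mathlib
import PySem

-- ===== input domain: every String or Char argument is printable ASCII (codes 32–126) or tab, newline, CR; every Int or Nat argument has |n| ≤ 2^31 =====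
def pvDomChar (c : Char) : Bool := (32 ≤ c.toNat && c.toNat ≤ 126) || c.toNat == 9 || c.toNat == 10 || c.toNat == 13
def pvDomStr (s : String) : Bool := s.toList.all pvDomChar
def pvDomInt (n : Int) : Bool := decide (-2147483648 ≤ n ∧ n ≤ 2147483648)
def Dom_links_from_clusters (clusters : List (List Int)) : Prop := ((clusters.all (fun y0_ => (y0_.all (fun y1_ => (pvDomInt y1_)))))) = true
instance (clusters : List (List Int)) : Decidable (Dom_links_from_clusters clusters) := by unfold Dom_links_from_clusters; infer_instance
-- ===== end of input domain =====

-- B replaces A's per-pair scan over all clusters by a precomputed element→cluster-id-set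
-- index, classifying each pair by a set intersection (objective: faster, asymptotic).

-- ===== PORT A =====
-- set.union(*clusters_lst): first cluster as a set, updated with the remaining elements
-- ([] case is Python's TypeError, excluded by Pre_; the value there is irrelevant)
def pvUnionAll : List (List Int) → PySem.Set Int
  | [] => []
  | c :: rest => PySem.Set.update (PySem.Set.ofList c) rest.flatten

-- it.combinations(elements, 2)
def pvCombos2 : List Int → List (Int × Int)
  | [] => []
  | x :: xs => xs.map (fun y => (x, y)) ++ pvCombos2 xs

def links_from_clusters (clusters : List (List Int)) : (List (Int × Int)) × (List (Int × Int)) :=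
  let elements := PySem.List.sorted (pvUnionAll clusters) (fun x => x) false
  (pvCombos2 elements).foldl
    (fun acc ij =>
      if ij.1 == ij.2 then acc
      else if clusters.any (fun c => c.contains ij.1 && c.contains ij.2) then
        (acc.1 ++ [ij], acc.2)
      else (acc.1, acc.2 ++ [ij]))
    ([], [])

-- ===== PORT B =====
-- for k, c in enumerate(clusters_lst): for x in c: member_ids.setdefault(x, set()).add(k)
def pvBuildIds : Int → List (List Int) → PySem.Dict Int (PySem.Set Int) → PySem.Dict Int (PySem.Set Int)
  | _, [], d => d
  | k, c :: rest, d =>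
      pvBuildIds (k + 1) rest (c.foldl (fun d x => d.modify x [] (fun s => PySem.Set.add s k)) d)

-- while rest: i, rest = rest[0], rest[1:]; for j in rest: classify (i, j)
def pvPairLoop (d : PySem.Dict Int (PySem.Set Int)) :
    List Int → (List (Int × Int)) × (List (Int × Int)) → (List (Int × Int)) × (List (Int × Int))
  | [], acc => acc
  | i :: rest, acc =>
      let idsI := d.getD i []
      pvPairLoop d rest
        (rest.foldl
          (fun acc j =>
            if !(PySem.Set.inter idsI (d.getD j [])).isEmpty then (acc.1 ++ [(i, j)], acc.2)
            else (acc.1, acc.2 ++ [(i, j)]))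
          acc)

def links_from_clusters_alt (clusters : List (List Int)) : (List (Int × Int)) × (List (Int × Int)) :=
  let memberIds := pvBuildIds 0 clusters PySem.Dict.empty
  pvPairLoop memberIds (PySem.List.sorted memberIds.keys (fun x => x) false) ([], [])

-- ===== PRECONDITION & SPEC =====
-- Pre_ excludes only the empty clusters list, where A's set.union(*[]) raises TypeError.
def Pre_links_from_clusters (clusters : List (List Int)) : Prop := clusters ≠ []
instance (clusters : List (List Int)) : Decidable (Pre_links_from_clusters clusters) := by unfold Pre_links_from_clusters; infer_instance
def pvWitness_links_from_clusters : List (List Int) := [[1, 2], [2, 3]]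

def Spec_links_from_clusters (clusters : List (List Int)) (out : (List (Int × Int)) × (List (Int × Int))) : Prop := out = links_from_clusters_alt clusters
instance (clusters : List (List Int)) (out : (List (Int × Int)) × (List (Int × Int))) : Decidable (Spec_links_from_clusters clusters out) := by unfold Spec_links_from_clusters; infer_instance

-- ===== CLAIM (what is proved, stated in full; the proofs are below) =====
def Claim_equal_links_from_clusters : Prop := ∀ (clusters : List (List Int)), Dom_links_from_clusters clusters → Pre_links_from_clusters clusters → Spec_links_from_clusters clusters (links_from_clusters clusters)

-- ===== LEMMAS AND PROOFS =====

-- membership in the id set accumulated by the inner fold over one cluster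
lemma pvMem_innerFold (c : List Int) (d : PySem.Dict Int (PySem.Set Int)) (k x j : Int) :
    j ∈ (c.foldl (fun d x => d.modify x [] (fun s => PySem.Set.add s k)) d).getD x [] ↔
      j ∈ d.getD x [] ∨ (j = k ∧ x ∈ c) := by
  induction c generalizing d with
  | nil => simp
  | cons y c ih =>
      simp only [List.foldl_cons, ih, PySem.Dict.getD_modify, List.mem_cons]
      by_cases h : x = y
      · subst h; simp [PySem.Set.mem_add]; tauto
      · rw [if_neg h]; tauto

lemma pvMem_buildIds (l : List (List Int)) (k : Int) (d : PySem.Dict Int (PySem.Set Int)) (x j : Int) :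
    j ∈ (pvBuildIds k l d).getD x [] ↔
      j ∈ d.getD x [] ∨ ∃ m : Nat, ∃ hm : m < l.length, j = k + m ∧ x ∈ l[m] := by
  induction l generalizing k d with
  | nil => simp [pvBuildIds]
  | cons c l ih =>
      simp only [pvBuildIds, ih, pvMem_innerFold, List.length_cons]
      constructor
      · rintro ((h | ⟨rfl, hx⟩) | ⟨m, hm, rfl, hx⟩)
        · exact Or.inl h
        · exact Or.inr ⟨0, by omega, by simp, by simpa using hx⟩
        · exact Or.inr ⟨m + 1, by omega, by push_cast; ring, by simpa using hx⟩
      · rintro (h | ⟨m, hm, rfl, hx⟩)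
        · exact Or.inl (Or.inl h)
        · cases m with
          | zero => exact Or.inl (Or.inr ⟨by simp, by simpa using hx⟩)
          | succ m =>
              refine Or.inr ⟨m, by omega, by push_cast; ring, ?_⟩
              simpa using hx

lemma pvShared_iff (clusters : List (List Int)) (i j : Int) :
    (∃ a, a ∈ (pvBuildIds 0 clusters PySem.Dict.empty).getD i [] ∧
          a ∈ (pvBuildIds 0 clusters PySem.Dict.empty).getD j []) ↔
      ∃ c ∈ clusters, i ∈ c ∧ j ∈ c := by
  constructor
  · rintro ⟨a, hi, hj⟩
    rw [pvMem_buildIds] at hi hj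
    simp only [PySem.Dict.getD_empty, List.not_mem_nil, false_or] at hi hj
    obtain ⟨m, hm, he, hxi⟩ := hi
    obtain ⟨m', hm', he', hxj⟩ := hj
    have hmm : m' = m := by omega
    subst hmm
    exact ⟨clusters[m'], List.getElem_mem hm, hxi, hxj⟩
  · rintro ⟨c, hc, hi, hj⟩
    obtain ⟨m, hm, rfl⟩ := List.mem_iff_getElem.mp hc
    refine ⟨(m : Int), ?_, ?_⟩ <;>
      · rw [pvMem_buildIds]
        exact Or.inr ⟨m, hm, by simp, by assumption⟩

lemma pvTest_eq (clusters : List (List Int)) (i j : Int) :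
    (!(PySem.Set.inter ((pvBuildIds 0 clusters PySem.Dict.empty).getD i [])
        ((pvBuildIds 0 clusters PySem.Dict.empty).getD j [])).isEmpty) =
      clusters.any (fun c => c.contains i && c.contains j) := by
  rw [Bool.eq_iff_iff]
  rw [Bool.not_eq_eq_eq_not, Bool.not_true, List.isEmpty_eq_false_iff_exists_mem]
  simp only [PySem.Set.inter, List.mem_filter, PySem.Set.contains_eq_listContains,
    List.contains_iff_mem, List.any_eq_true, Bool.and_eq_true]
  exact pvShared_iff clusters i j

-- keys of the index dict have exactly the members of the flattened clusters
lemma pvMem_keys_buildIds (l : List (List Int)) (k : Int) (d : PySem.Dict Int (PySem.Set Int)) (x : Int) :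
    x ∈ (pvBuildIds k l d).keys ↔ x ∈ d.keys ∨ x ∈ l.flatten := by
  induction l generalizing k d with
  | nil => simp [pvBuildIds]
  | cons c l ih =>
      simp only [pvBuildIds, ih, PySem.Dict.keys_foldl_modify, PySem.Set.mem_update,
        List.flatten_cons, List.mem_append]
      tauto

lemma pvNodup_keys_buildIds (l : List (List Int)) (k : Int) (d : PySem.Dict Int (PySem.Set Int))
    (h : d.keys.Nodup) : (pvBuildIds k l d).keys.Nodup := by
  induction l generalizing k d with
  | nil => exact h
  | cons c l ih =>
      exact ih _ _ (PySem.Dict.nodup_keys_foldl_modify_key c (fun x => x) [] _ d h)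

-- both programs sort the same element set
lemma pvElements_eq (clusters : List (List Int)) (h : clusters ≠ []) :
    PySem.List.sorted (pvUnionAll clusters) (fun x => x) false =
      PySem.List.sorted (pvBuildIds 0 clusters PySem.Dict.empty).keys (fun x => x) false := by
  apply PySem.List.sorted_eq_sorted_of_perm _ _ _ (fun a b hab => hab)
  rw [List.perm_ext_iff_of_nodup]
  · intro a
    rw [pvMem_keys_buildIds]
    cases clusters with
    | nil => exact absurd rfl h
    | cons c rest =>
        simp [pvUnionAll, PySem.Set.mem_update, PySem.Set.mem_ofList,
          PySem.Dict.keys_empty, List.flatten_cons]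
  · cases clusters with
    | nil => exact absurd rfl h
    | cons c rest => exact PySem.Set.nodup_update _ _ (PySem.Set.nodup_ofList c)
  · exact pvNodup_keys_buildIds _ _ _ (by simp [PySem.Dict.keys_empty])

-- the two pair loops agree on any strictly increasing element list
lemma pvLoops_eq (clusters : List (List Int)) (E : List Int)
    (hE : E.Pairwise (· < ·)) (acc : (List (Int × Int)) × (List (Int × Int))) :
    (pvCombos2 E).foldl
      (fun acc ij =>
        if ij.1 == ij.2 then acc
        else if clusters.any (fun c => c.contains ij.1 && c.contains ij.2) then
          (acc.1 ++ [ij], acc.2)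
        else (acc.1, acc.2 ++ [ij])) acc =
      pvPairLoop (pvBuildIds 0 clusters PySem.Dict.empty) E acc := by
  induction E generalizing acc with
  | nil => rfl
  | cons i rest ih =>
      rw [List.pairwise_cons] at hE
      simp only [pvCombos2, List.foldl_append, List.foldl_map, pvPairLoop]
      rw [ih hE.2]
      congr 1
      apply PySem.List.foldl_congr_mem
      intro a j hj
      have hne : (i == j) = false := by
        simp only [beq_eq_false_iff_ne, ne_eq]
        exact ne_of_lt (hE.1 j hj)
      rw [hne, pvTest_eq clusters i j]
      simp

-- ===== VERDICT (by name: the statement is the Claim_ definition above) =====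
theorem links_from_clusters_spec : Claim_equal_links_from_clusters := by
  intro clusters _ hpre
  unfold Spec_links_from_clusters links_from_clusters links_from_clusters_alt
  rw [pvElements_eq clusters hpre]
  apply pvLoops_eq
  have h1 := PySem.List.sorted_pairwise (pvBuildIds 0 clusters PySem.Dict.empty).keys (fun x => x)
  have h2 : (PySem.List.sorted (pvBuildIds 0 clusters PySem.Dict.empty).keys (fun x => x) false).Nodup :=
    (PySem.List.sorted_perm _ _ _).nodup_iff.mpr
      (pvNodup_keys_buildIds _ _ _ (by simp [PySem.Dict.keys_empty]))
  exact (h1.and h2).imp (fun h => lt_of_le_of_ne h.1 h.2)
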